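-- pv_equiv track=rewrite | github.com/Clamepending/toolcalltokenization | toolcalltokenization/trace_utils.py | build_next_token_cache
-- ===== SOURCE A (Python) =====
-- from collections import Counter, defaultdict
-- from typing import Dict, Iterable, List, Sequence, Tuple
--
-- def build_next_token_cache(
--     sequences: Dict[str, List[str]],
--     context_len: int = 2,
-- ) -> Dict[Tuple[str, ...], Counter]:
--     cache: Dict[Tuple[str, ...], Counter] = defaultdict(Counter)
--     for sequence in sequences.values():
--         if len(sequence) <= context_len:
--             continue
--         for index in range(context_len, len(sequence)):
--             context = tuple(sequence[index - context_len : index])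
--             next_token = sequence[index]
--             cache[context][next_token] += 1
--     return cache
-- ===== SOURCE B (Python) =====
-- from collections import Counter, defaultdict
--
--
-- def build_next_token_cache(
--     sequences,
--     context_len=2,
-- ):
--     # Materialize the full transition list once.
--     transitions = [
--         (tuple(seq[i - context_len:i]), seq[i])
--         for seq in sequences.values()
--         for i in range(context_len, len(seq))
--     ]
--     # Enumerate distinct contexts (first-occurrence order); for each, count each
--     # distinct following token by brute-force list.count — no incremental updates.
--     cache = defaultdict(Counter)
--     for context in dict.fromkeys(c for c, _ in transitions):
--         tokens = [t for c, t in transitions if c == context]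
--         cache[context] = Counter({t: tokens.count(t) for t in dict.fromkeys(tokens)})
--     return cache
-- ===== Notes on version B (the rewrite author's own statement) =====
-- stated objective: alternative
-- what changed: Instead of one sliding pass incrementally updating nested Counters, B materializes the transition list, enumerates the distinct contexts, and for each context counts each distinct next token by filtering and list.count — declarative group-and-count instead of incremental accumulation.
import Mathlib
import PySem

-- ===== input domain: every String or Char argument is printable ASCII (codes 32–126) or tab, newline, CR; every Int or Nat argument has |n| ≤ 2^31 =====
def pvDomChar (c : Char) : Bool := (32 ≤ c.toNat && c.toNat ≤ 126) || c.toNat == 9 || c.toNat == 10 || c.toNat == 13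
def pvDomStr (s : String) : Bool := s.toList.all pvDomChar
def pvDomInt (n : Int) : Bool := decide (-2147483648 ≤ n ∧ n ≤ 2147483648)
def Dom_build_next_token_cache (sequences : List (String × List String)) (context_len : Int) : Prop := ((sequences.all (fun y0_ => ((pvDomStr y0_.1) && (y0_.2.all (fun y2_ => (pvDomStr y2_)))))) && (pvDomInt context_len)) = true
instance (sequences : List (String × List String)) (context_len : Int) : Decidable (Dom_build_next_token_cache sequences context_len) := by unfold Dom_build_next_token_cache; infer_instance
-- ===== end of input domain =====

-- B replaces A's single incremental pass with a group-and-count computation: materialize the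
-- transition list, enumerate distinct contexts, count each distinct next token by list.count
-- (objective: alternative; not faster).

-- ===== PORT A =====
-- cache[context][next_token] += 1 on a defaultdict(Counter) = modify at context (default {}) with an
-- inner modify at next_token (default 0).  sequence[index] is pyGet?; none = IndexError, which
-- Pre_build_next_token_cache excludes, so the .getD "" default is never taken inside Pre_.
def build_next_token_cache (sequences : List (String × List String)) (context_len : Int) : List (List String × List (String × Int)) :=
  (sequences.foldl
    (fun (cache : PySem.Dict (List String) (PySem.Dict String Int)) kv =>
      if (kv.2.length : Int) ≤ context_len then cache
      else
        (PySem.List.pyRange context_len (kv.2.length : Int) 1).foldl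
          (fun cache index =>
            cache.modify (PySem.List.slice kv.2 (some (index - context_len)) (some index))
              PySem.Dict.empty
              (fun ctr => ctr.modify ((PySem.List.pyGet? kv.2 index).getD "") 0 (· + 1)))
          cache)
    PySem.Dict.empty).items.map (fun p => (p.1, p.2.items))

-- ===== PORT B =====
-- the transition comprehension is the flatMap of per-sequence maps; dict.fromkeys = PySem.Set.ofList
-- (distinct elements in first-occurrence order); the per-context dict comprehension with tokens.count
-- is the inner map.
def build_next_token_cache_alt (sequences : List (String × List String)) (context_len : Int) : List (List String × List (String × Int)) :=
  let transitions := sequences.flatMap (fun kv =>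
    (PySem.List.pyRange context_len (kv.2.length : Int) 1).map
      (fun i => (PySem.List.slice kv.2 (some (i - context_len)) (some i),
                 (PySem.List.pyGet? kv.2 i).getD "")))
  (PySem.Set.ofList (transitions.map Prod.fst)).map (fun c =>
    let toks := (transitions.filter (fun p => p.1 == c)).map Prod.snd
    (c, (PySem.Set.ofList toks).map (fun t => (t, (toks.count t : Int)))))

-- ===== PRECONDITION & SPEC =====
-- Pre_ excludes exactly the inputs where the Python A raises IndexError: a negative context_len that
-- reaches below -len(sequence) for some sequence (sequence[index] with index < -len).
def Pre_build_next_token_cache (sequences : List (String × List String)) (context_len : Int) : Prop :=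
  ∀ kv ∈ sequences, -(kv.2.length : Int) ≤ context_len
instance (sequences : List (String × List String)) (context_len : Int) : Decidable (Pre_build_next_token_cache sequences context_len) := by unfold Pre_build_next_token_cache; infer_instance

def pvWitness_build_next_token_cache : (List (String × List String)) × Int :=
  ([("a", ["x", "y", "z", "x", "y"]), ("b", ["y", "z"])], 1)

def Spec_build_next_token_cache (sequences : List (String × List String)) (context_len : Int) (out : List (List String × List (String × Int))) : Prop := out = build_next_token_cache_alt sequences context_len
instance (sequences : List (String × List String)) (context_len : Int) (out : List (List String × List (String × Int))) : Decidable (Spec_build_next_token_cache sequences context_len out) := by unfold Spec_build_next_token_cache; infer_instance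

-- ===== CLAIM =====
def Claim_equal_build_next_token_cache : Prop := ∀ (sequences : List (String × List String)) (context_len : Int), Dom_build_next_token_cache sequences context_len → Pre_build_next_token_cache sequences context_len → Spec_build_next_token_cache sequences context_len (build_next_token_cache sequences context_len)

-- ===== LEMMAS AND PROOFS =====

-- the list of (context, next_token) transitions one sequence contributes
def pvTr (cl : Int) (seq : List String) : List (List String × String) :=
  (PySem.List.pyRange cl (seq.length : Int) 1).map
    (fun i => (PySem.List.slice seq (some (i - cl)) (some i), (PySem.List.pyGet? seq i).getD ""))

-- A's step: nested increment
def pvNStep (cache : PySem.Dict (List String) (PySem.Dict String Int)) (p : List String × String) : PySem.Dict (List String) (PySem.Dict String Int) :=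
  cache.modify p.1 PySem.Dict.empty (fun ctr => ctr.modify p.2 0 (· + 1))

theorem pv_foldl_foldl_flatMap {α β γ : Type} (l : List α) (g : α → List β) (f : γ → β → γ) (init : γ) :
    l.foldl (fun acc x => (g x).foldl f acc) init = (l.flatMap g).foldl f init := by
  induction l generalizing init with
  | nil => rfl
  | cons a l ih => simp [List.foldl_append, ih]

theorem pvTr_nil_of_le (cl : Int) (seq : List String) (h : (seq.length : Int) ≤ cl) :
    pvTr cl seq = [] := by
  unfold pvTr
  rw [PySem.List.pyRange_one]
  have : ((seq.length : Int) - cl).toNat = 0 := by omega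
  simp [this]

theorem pvA_norm (s : List (String × List String)) (cl : Int) :
    build_next_token_cache s cl
      = ((s.flatMap (fun kv => pvTr cl kv.2)).foldl pvNStep PySem.Dict.empty).items.map
          (fun p => (p.1, p.2.items)) := by
  unfold build_next_token_cache
  rw [← pv_foldl_foldl_flatMap]
  congr 2
  apply PySem.List.foldl_congr_mem
  intro cache kv _
  by_cases h : (kv.2.length : Int) ≤ cl
  · rw [if_pos h, pvTr_nil_of_le cl kv.2 h]
    rfl
  · rw [if_neg h]
    unfold pvTr
    rw [List.foldl_map]
    rfl

-- nested building, read at one context c: the incremental counter of the tokens following c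
theorem pv_nb_getD (ts : List (List String × String)) (d : PySem.Dict (List String) (PySem.Dict String Int)) (c : List String) :
    (ts.foldl pvNStep d).getD c PySem.Dict.empty
      = ((ts.filter (fun p => p.1 == c)).map Prod.snd).foldl
          (fun ctr n => ctr.modify n 0 (· + 1)) (d.getD c PySem.Dict.empty) := by
  induction ts generalizing d with
  | nil => rfl
  | cons p ts ih =>
      rw [List.foldl_cons, ih]
      by_cases hc : p.1 = c
      · simp [pvNStep, hc]
      · simp [pvNStep, hc, PySem.Dict.getD_modify, Ne.symm hc]

-- the central lemma: A's incrementally built nested dict, serialized, is exactly B's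
-- group-and-count expression over the same transition list
theorem pv_main (ts : List (List String × String)) :
    ((ts.foldl pvNStep PySem.Dict.empty).items.map (fun p => (p.1, p.2.items)))
      = (PySem.Set.ofList (ts.map Prod.fst)).map (fun c =>
          (c, (PySem.Set.ofList ((ts.filter (fun p => p.1 == c)).map Prod.snd)).map
                (fun t => (t, (((ts.filter (fun p => p.1 == c)).map Prod.snd).count t : Int))))) := by
  have hNS : pvNStep = fun (d : PySem.Dict (List String) (PySem.Dict String Int)) x =>
      d.modify x.1 PySem.Dict.empty (fun ctr => ctr.modify x.2 0 (· + 1)) := rfl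
  have hk : (ts.foldl pvNStep PySem.Dict.empty).keys = PySem.Set.ofList (ts.map Prod.fst) := by
    have h := PySem.Dict.keys_foldl_modify_key ts Prod.fst
      (PySem.Dict.empty : PySem.Dict String Int)
      (fun _ p => fun ctr => ctr.modify p.2 0 (· + 1)) PySem.Dict.empty
    rw [hNS]
    simpa [PySem.Dict.keys_empty, PySem.Set.update_nil_left] using h
  have hnd : (ts.foldl pvNStep PySem.Dict.empty).keys.Nodup := by
    rw [hk]; exact PySem.Set.nodup_ofList _
  rw [PySem.Dict.items_eq_map_keys _ hnd PySem.Dict.empty, hk, List.map_map]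
  apply List.map_congr_left
  intro c _
  have hgd : (ts.foldl pvNStep PySem.Dict.empty).getD c PySem.Dict.empty
      = PySem.Dict.counter ((ts.filter (fun p => p.1 == c)).map Prod.snd) := by
    rw [pv_nb_getD, PySem.Dict.getD_empty, PySem.Dict.counter_eq_foldl]
  show (c, ((ts.foldl pvNStep PySem.Dict.empty).getD c PySem.Dict.empty).items) = _
  rw [hgd, PySem.Dict.items_counter]

-- ===== VERDICT (by name: the statement is the Claim_ definition above) =====
theorem build_next_token_cache_spec : Claim_equal_build_next_token_cache := by
  intro sequences context_len _hdom _hpre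
  unfold Spec_build_next_token_cache
  rw [pvA_norm]
  unfold build_next_token_cache_alt pvTr
  exact pv_main _
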